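-- pv_equiv track=rewrite | github.com/tnogami/at_coder | problems/ABC/ABC275/abc275_c.py | check
-- ===== SOURCE A (Python) =====
-- from itertools import combinations
--
-- def check(comb):
--     d = dict()
--     for c in combinations(comb, 2):
--         dist = (c[0][0]-c[1][0])**2 + (c[0][1]-c[1][1])**2
--         if dist in d:
--             d[dist] += 1
--         else:
--             d[dist] = 1
--
--     if len(d) == 2:
--         L = list(d.values())
--         if (L[0] == 2 and L[1] == 4) or (L[0] == 4 and L[1] == 2):
--             return True
--     return False
-- ===== SOURCE B (Python) =====
-- from itertools import combinations
--
-- def check(comb):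
--     d = sorted((p[0] - q[0]) ** 2 + (p[1] - q[1]) ** 2 for p, q in combinations(comb, 2))
--     return len(d) == 6 and (
--         (d[0] == d[1] and d[1] < d[2] and d[2] == d[5])
--         or (d[0] == d[3] and d[3] < d[4] and d[4] == d[5]))
-- ===== Notes on version B (the rewrite author's own statement) =====
-- stated objective: alternative
-- what changed: Replaces A's value-counting dict and multiplicity tests by sorting the six squared distances and checking the positional shape [a,a,b,b,b,b] or [a,a,a,a,b,b] directly on the sorted list, with no counting at all.
import Mathlib
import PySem

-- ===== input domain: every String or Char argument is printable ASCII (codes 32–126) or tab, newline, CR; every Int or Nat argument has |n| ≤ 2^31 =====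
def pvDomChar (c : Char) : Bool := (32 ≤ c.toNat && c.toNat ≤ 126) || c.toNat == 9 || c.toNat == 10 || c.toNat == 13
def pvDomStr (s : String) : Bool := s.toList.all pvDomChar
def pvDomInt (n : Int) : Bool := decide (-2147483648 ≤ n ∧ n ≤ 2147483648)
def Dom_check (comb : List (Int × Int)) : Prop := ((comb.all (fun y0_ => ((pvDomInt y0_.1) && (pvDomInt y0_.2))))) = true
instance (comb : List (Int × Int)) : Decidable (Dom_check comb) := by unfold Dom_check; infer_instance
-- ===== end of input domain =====

-- B replaces A's value-counting dict and multiplicity tests by sorting the six squared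
-- distances and checking the positional shape [a,a,b,b,b,b] / [a,a,a,a,b,b] directly.

-- ===== PORT A =====
-- itertools.combinations(xs, 2) in order
def combinations2 {α : Type} (xs : List α) : List (α × α) :=
  match xs with
  | [] => []
  | x :: rest => rest.map (fun y => (x, y)) ++ combinations2 rest

def check (comb : List (Int × Int)) : Bool :=
  let d : PySem.Dict Int Int := (combinations2 comb).foldl
    (fun d c =>
      let dist := (c.1.1 - c.2.1) ^ 2 + (c.1.2 - c.2.2) ^ 2
      if d.contains dist then
        d.insert dist (d.getD dist 0 + 1)
      else
        d.insert dist 1)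
    PySem.Dict.empty
  if d.size == 2 then
    let L := d.values
    if (PySem.List.pyGetD L 0 0 == 2 && PySem.List.pyGetD L 1 0 == 4) ||
       (PySem.List.pyGetD L 0 0 == 4 && PySem.List.pyGetD L 1 0 == 2) then
      true
    else false
  else false

-- ===== PORT B =====
def check_alt (comb : List (Int × Int)) : Bool :=
  let d := PySem.List.sorted
    ((combinations2 comb).map (fun c => (c.1.1 - c.2.1) ^ 2 + (c.1.2 - c.2.2) ^ 2))
    (fun x => x) false
  decide (d.length = 6) &&
    ((PySem.List.pyGetD d 0 0 == PySem.List.pyGetD d 1 0 &&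
      decide (PySem.List.pyGetD d 1 0 < PySem.List.pyGetD d 2 0) &&
      PySem.List.pyGetD d 2 0 == PySem.List.pyGetD d 5 0) ||
     (PySem.List.pyGetD d 0 0 == PySem.List.pyGetD d 3 0 &&
      decide (PySem.List.pyGetD d 3 0 < PySem.List.pyGetD d 4 0) &&
      PySem.List.pyGetD d 4 0 == PySem.List.pyGetD d 5 0))

-- ===== PRECONDITION & SPEC =====
def Spec_check (comb : List (Int × Int)) (out : Bool) : Prop := out = check_alt comb
instance (comb : List (Int × Int)) (out : Bool) : Decidable (Spec_check comb out) := by unfold Spec_check; infer_instance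

-- ===== CLAIM (what is proved, stated in full; the proofs are below) =====
def Claim_equal_check : Prop := ∀ (comb : List (Int × Int)), Dom_check comb → Spec_check comb (check comb)

-- ===== LEMMAS AND PROOFS =====

-- A's fold step is the standard counter step
lemma step_eq_counter_step :
    (fun (d : PySem.Dict Int Int) (c : (Int × Int) × (Int × Int)) =>
      let dist := (c.1.1 - c.2.1) ^ 2 + (c.1.2 - c.2.2) ^ 2
      if d.contains dist then d.insert dist (d.getD dist 0 + 1) else d.insert dist 1)
    = (fun d c =>
        d.insert ((c.1.1 - c.2.1) ^ 2 + (c.1.2 - c.2.2) ^ 2)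
          (d.getD ((c.1.1 - c.2.1) ^ 2 + (c.1.2 - c.2.2) ^ 2) 0 + 1)) := by
  funext d c
  by_cases h : d.contains ((c.1.1 - c.2.1) ^ 2 + (c.1.2 - c.2.2) ^ 2)
  · simp [h]
  · show (if _ then _ else _) = _
    rw [if_neg (by simpa using h), PySem.Dict.getD_of_not_contains d 0 (by simpa using h)]
    norm_num

lemma counter_map (xs : List ((Int × Int) × (Int × Int))) :
    xs.foldl (fun d c =>
        d.insert ((c.1.1 - c.2.1) ^ 2 + (c.1.2 - c.2.2) ^ 2)
          (d.getD ((c.1.1 - c.2.1) ^ 2 + (c.1.2 - c.2.2) ^ 2) 0 + 1)) PySem.Dict.empty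
      = PySem.Dict.counter (xs.map (fun c => (c.1.1 - c.2.1) ^ 2 + (c.1.2 - c.2.2) ^ 2)) := by
  rw [← PySem.Dict.foldl_insert_getD_add_one_eq_counter, List.foldl_map]

-- A's tail on the distance list
def Acore (ds : List Int) : Bool :=
  let d := PySem.Dict.counter ds
  if d.size == 2 then
    let L := d.values
    if (PySem.List.pyGetD L 0 0 == 2 && PySem.List.pyGetD L 1 0 == 4) ||
       (PySem.List.pyGetD L 0 0 == 4 && PySem.List.pyGetD L 1 0 == 2) then
      true
    else false
  else false

-- B's tail on the distance list
def Bcore (ds : List Int) : Bool :=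
  let d := PySem.List.sorted ds (fun x => x) false
  decide (d.length = 6) &&
    ((PySem.List.pyGetD d 0 0 == PySem.List.pyGetD d 1 0 &&
      decide (PySem.List.pyGetD d 1 0 < PySem.List.pyGetD d 2 0) &&
      PySem.List.pyGetD d 2 0 == PySem.List.pyGetD d 5 0) ||
     (PySem.List.pyGetD d 0 0 == PySem.List.pyGetD d 3 0 &&
      decide (PySem.List.pyGetD d 3 0 < PySem.List.pyGetD d 4 0) &&
      PySem.List.pyGetD d 4 0 == PySem.List.pyGetD d 5 0))

-- common characterization: the multiset of distances is {a,a,b,b,b,b} or {a,a,a,a,b,b}, a < b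
def TwoFour (ds : List Int) : Prop :=
  ∃ a b : Int, a < b ∧ (ds.Perm [a, a, b, b, b, b] ∨ ds.Perm [a, a, a, a, b, b])

-- two-/six-element decompositions
lemma len2 {α : Type} (l : List α) (h : l.length = 2) : ∃ a b : α, l = [a, b] := by
  match l, h with
  | [a, b], _ => exact ⟨a, b, rfl⟩

lemma len6 {α : Type} (l : List α) (h : l.length = 6) :
    ∃ a b c d e f : α, l = [a, b, c, d, e, f] := by
  match l, h with
  | [a, b, c, d, e, f], _ => exact ⟨a, b, c, d, e, f, rfl⟩

-- a list whose elements all lie in {u, v} is a permutation of replicate ++ replicate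
lemma perm_two_vals (ds : List Int) (u v : Int) (huv : u ≠ v)
    (hmem : ∀ x ∈ ds, x = u ∨ x = v) :
    ds.Perm (List.replicate (ds.count u) u ++ List.replicate (ds.count v) v) := by
  rw [List.perm_iff_count]
  intro x
  rw [List.count_append, List.count_replicate, List.count_replicate]
  by_cases hu : u = x
  · subst hu
    have hvu : (v == u) = false := by
      simp only [beq_eq_false_iff_ne, ne_eq]
      exact fun h => huv h.symm
    simp [hvu]
  · by_cases hv : v = x
    · subst hv
      have huv' : (u == v) = false := by simpa using huv
      simp [huv']
    · have hx : x ∉ ds := by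
        intro hxm
        rcases hmem x hxm with h | h
        · exact hu h.symm
        · exact hv h.symm
      have hu' : (u == x) = false := by simpa using hu
      have hv' : (v == x) = false := by simpa using hv
      simp [List.count_eq_zero.2 hx, hu', hv']

-- counts in the two shape literals
lemma count_shape24 (a b : Int) (hab : a ≠ b) :
    ([a, a, b, b, b, b] : List Int).count a = 2 ∧ ([a, a, b, b, b, b] : List Int).count b = 4 := by
  have hba : b ≠ a := Ne.symm hab
  have e : ([a, a, b, b, b, b] : List Int) = List.replicate 2 a ++ List.replicate 4 b := rfl
  rw [e]
  constructor <;> simp [hab, hba]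

lemma count_shape42 (a b : Int) (hab : a ≠ b) :
    ([a, a, a, a, b, b] : List Int).count a = 4 ∧ ([a, a, a, a, b, b] : List Int).count b = 2 := by
  have hba : b ≠ a := Ne.symm hab
  have e : ([a, a, a, a, b, b] : List Int) = List.replicate 4 a ++ List.replicate 2 b := rfl
  rw [e]
  constructor <;> simp [hab, hba]

-- a TwoFour multiset has exactly two distinct values
lemma ofList_pair (ds : List Int) (a b : Int) (hab : a ≠ b)
    (hm : ∀ x, x ∈ ds ↔ x = a ∨ x = b) :
    (PySem.Set.ofList ds).length = 2 := by
  have hp : (PySem.Set.ofList ds).Perm [a, b] := by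
    rw [List.perm_ext_iff_of_nodup (PySem.Set.nodup_ofList ds) (by simp [hab])]
    intro x
    rw [PySem.Set.mem_ofList ds x, hm x]
    simp
  simpa using hp.length_eq

lemma Acore_iff (ds : List Int) : Acore ds = true ↔ TwoFour ds := by
  have hsize : (PySem.Dict.counter ds).size = (PySem.Set.ofList ds).length := by
    simp [PySem.Dict.size, PySem.Dict.items_counter]
  have hvals : (PySem.Dict.counter ds).values
      = (PySem.Set.ofList ds).map (fun k => (List.count k ds : Int)) := by
    simp [PySem.Dict.values, PySem.Dict.items_counter]
  unfold Acore
  simp only [hsize, hvals]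
  by_cases h2 : (PySem.Set.ofList ds).length = 2
  · obtain ⟨u, v, hSuv⟩ := len2 _ h2
    have huv : u ≠ v := by
      have hnd := PySem.Set.nodup_ofList ds
      rw [hSuv] at hnd
      simpa using hnd
    have hmemS : ∀ x, x ∈ ds ↔ (x = u ∨ x = v) := by
      intro x
      rw [← PySem.Set.mem_ofList ds x, hSuv]
      simp
    rw [hSuv]
    simp only [List.map_cons, List.map_nil]
    simp only [PySem.List.pyGetD, PySem.List.pyGet?, PySem.List.pyIdx?]
    norm_num
    constructor
    · rintro (⟨hcu, hcv⟩ | ⟨hcu, hcv⟩)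
      · have hcu' : ds.count u = 2 := by exact_mod_cast hcu
        have hcv' : ds.count v = 4 := by exact_mod_cast hcv
        have hp := perm_two_vals ds u v huv (fun x hx => (hmemS x).1 hx)
        rw [hcu', hcv'] at hp
        rcases lt_or_gt_of_ne huv with h | h
        · exact ⟨u, v, h, Or.inl hp⟩
        · exact ⟨v, u, h, Or.inr (hp.trans List.perm_append_comm)⟩
      · have hcu' : ds.count u = 4 := by exact_mod_cast hcu
        have hcv' : ds.count v = 2 := by exact_mod_cast hcv
        have hp := perm_two_vals ds u v huv (fun x hx => (hmemS x).1 hx)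
        rw [hcu', hcv'] at hp
        rcases lt_or_gt_of_ne huv with h | h
        · exact ⟨u, v, h, Or.inr hp⟩
        · exact ⟨v, u, h, Or.inl (hp.trans List.perm_append_comm)⟩
    · rintro ⟨a, b, hab, hp | hp⟩
      · have hca := hp.count_eq a
        have hcb := hp.count_eq b
        rw [(count_shape24 a b hab.ne).1] at hca
        rw [(count_shape24 a b hab.ne).2] at hcb
        have hmab : ∀ x, x ∈ ds ↔ x = a ∨ x = b := by
          intro x; rw [hp.mem_iff]; simp
        rcases (hmab u).1 ((hmemS u).2 (Or.inl rfl)) with hu | hu <;>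
          rcases (hmab v).1 ((hmemS v).2 (Or.inr rfl)) with hv | hv <;>
          first
          | (exact absurd (hu.trans hv.symm) huv)
          | (subst hu; subst hv;
             first
             | exact Or.inl ⟨by exact_mod_cast hca, by exact_mod_cast hcb⟩
             | exact Or.inl ⟨by exact_mod_cast hcb, by exact_mod_cast hca⟩
             | exact Or.inr ⟨by exact_mod_cast hca, by exact_mod_cast hcb⟩
             | exact Or.inr ⟨by exact_mod_cast hcb, by exact_mod_cast hca⟩)
      · have hca := hp.count_eq a
        have hcb := hp.count_eq b
        rw [(count_shape42 a b hab.ne).1] at hca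
        rw [(count_shape42 a b hab.ne).2] at hcb
        have hmab : ∀ x, x ∈ ds ↔ x = a ∨ x = b := by
          intro x; rw [hp.mem_iff]; simp
        rcases (hmab u).1 ((hmemS u).2 (Or.inl rfl)) with hu | hu <;>
          rcases (hmab v).1 ((hmemS v).2 (Or.inr rfl)) with hv | hv <;>
          first
          | (exact absurd (hu.trans hv.symm) huv)
          | (subst hu; subst hv;
             first
             | exact Or.inl ⟨by exact_mod_cast hca, by exact_mod_cast hcb⟩
             | exact Or.inl ⟨by exact_mod_cast hcb, by exact_mod_cast hca⟩
             | exact Or.inr ⟨by exact_mod_cast hca, by exact_mod_cast hcb⟩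
             | exact Or.inr ⟨by exact_mod_cast hcb, by exact_mod_cast hca⟩)
  · have hif : (((PySem.Set.ofList ds).length == 2) = false) := by simpa using h2
    simp only [hif]
    constructor
    · intro h; simp at h
    · rintro ⟨a, b, hab, hp | hp⟩ <;>
      · exfalso
        apply h2
        apply ofList_pair ds a b hab.ne
        intro x
        rw [hp.mem_iff]; simp

lemma Bcore_iff (ds : List Int) : Bcore ds = true ↔ TwoFour ds := by
  unfold Bcore TwoFour
  constructor
  · intro h
    simp only [Bool.and_eq_true, decide_eq_true_eq, Bool.or_eq_true, beq_iff_eq] at h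
    obtain ⟨hlen, hpat⟩ := h
    obtain ⟨x0, x1, x2, x3, x4, x5, hs⟩ := len6 _ hlen
    have hperm := PySem.List.sorted_perm ds (fun x => x) false
    have hsort := PySem.List.sorted_pairwise ds (fun x => x)
    rw [hs] at hperm hsort hpat
    simp only [List.pairwise_cons, List.mem_cons] at hsort
    simp [PySem.List.pyGetD, PySem.List.pyGet?, PySem.List.pyIdx?] at hpat
    have o01 : x0 ≤ x1 := by simp_all
    have o12 : x1 ≤ x2 := by simp_all
    have o23 : x2 ≤ x3 := by simp_all
    have o34 : x3 ≤ x4 := by simp_all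
    have o45 : x4 ≤ x5 := by simp_all
    rcases hpat with ⟨⟨h01, h12⟩, h25⟩ | ⟨⟨h03, h34⟩, h45⟩
    · have e : ([x0, x1, x2, x3, x4, x5] : List Int) = [x0, x0, x2, x2, x2, x2] := by
        rw [show x1 = x0 by omega, show x3 = x2 by omega, show x4 = x2 by omega,
          show x5 = x2 by omega]
      rw [e] at hperm
      exact ⟨x0, x2, by omega, Or.inl hperm.symm⟩
    · have e : ([x0, x1, x2, x3, x4, x5] : List Int) = [x0, x0, x0, x0, x4, x4] := by
        rw [show x1 = x0 by omega, show x2 = x0 by omega, show x3 = x0 by omega,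
          show x5 = x4 by omega]
      rw [e] at hperm
      exact ⟨x0, x4, by omega, Or.inr hperm.symm⟩
  · rintro ⟨a, b, hab, hp | hp⟩
    · have hs := PySem.List.sorted_id_eq_of_perm_of_pairwise ds [a, a, b, b, b, b] hp.symm
        (by simp only [List.pairwise_cons, List.mem_cons]; norm_num; omega)
      rw [hs]
      simp [PySem.List.pyGetD, PySem.List.pyGet?, PySem.List.pyIdx?, hab]
    · have hs := PySem.List.sorted_id_eq_of_perm_of_pairwise ds [a, a, a, a, b, b] hp.symm
        (by simp only [List.pairwise_cons, List.mem_cons]; norm_num; omega)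
      rw [hs]
      simp [PySem.List.pyGetD, PySem.List.pyGet?, PySem.List.pyIdx?, hab]

lemma core_eq (ds : List Int) : Acore ds = Bcore ds := by
  rw [Bool.eq_iff_iff, Acore_iff, Bcore_iff]

-- ===== VERDICT (by name: the statement is the Claim_ definition above) =====
theorem check_spec : Claim_equal_check := by
  intro comb _
  show check comb = check_alt comb
  unfold check check_alt
  rw [step_eq_counter_step, counter_map]
  exact core_eq _
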